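-- pv_equiv track=rewrite | github.com/wzh20040310/sql_translator | sql_translator/core/operations.py | split_sql_parts
-- ===== SOURCE A (Python) =====
-- def split_sql_parts(sql):
--     """将SQL语句分割为各个子句"""
--     parts = {}
--     keywords = ['SELECT', 'FROM', 'WHERE', 'ORDER BY', 'GROUP BY', 'HAVING']
--
--     sql_upper = sql.upper()
--     positions = {}
--
--     # 找到所有关键字的位置
--     for keyword in keywords:
--         pos = sql_upper.find(keyword)
--         if pos != -1:
--             positions[keyword] = pos
--
--     # 按位置排序
--     sorted_positions = sorted(positions.items(), key=lambda x: x[1])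
--
--     # 提取各部分
--     for i, (keyword, pos) in enumerate(sorted_positions):
--         start = pos + len(keyword)
--         if i + 1 < len(sorted_positions):
--             end = sorted_positions[i + 1][1]
--         else:
--             end = len(sql)
--
--         parts[keyword] = sql[start:end].strip()
--
--     return parts
-- ===== SOURCE B (Python) =====
-- def split_sql_parts(sql):
--     """将SQL语句分割为各个子句"""
--     keywords = ['SELECT', 'FROM', 'WHERE', 'ORDER BY', 'GROUP BY', 'HAVING']
--     sql_upper = sql.upper()
--
--     # found keywords with their first positions, as a worklist
--     remaining = []
--     for keyword in keywords:
--         pos = sql_upper.find(keyword)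
--         if pos != -1:
--             remaining.append((keyword, pos))
--
--     # repeatedly take the keyword with the smallest position; the clause ends
--     # at the smallest position still in the worklist (or the end of the string)
--     parts = {}
--     while remaining:
--         keyword, pos = min(remaining, key=lambda kv: kv[1])
--         remaining.remove((keyword, pos))
--         end = min((p for _, p in remaining), default=len(sql))
--         parts[keyword] = sql[pos + len(keyword):end].strip()
--     return parts
-- ===== Notes on version B (the rewrite author's own statement) =====
-- stated objective: alternative
-- what changed: B replaces A's sort-then-lookahead (sort the found keyword positions, then slice each clause up to the next entry of the sorted list) by a sort-free selection worklist: repeatedly pop the keyword with the smallest position and end its clause at the smallest position still in the worklist (or at len(sql)).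
import Mathlib
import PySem

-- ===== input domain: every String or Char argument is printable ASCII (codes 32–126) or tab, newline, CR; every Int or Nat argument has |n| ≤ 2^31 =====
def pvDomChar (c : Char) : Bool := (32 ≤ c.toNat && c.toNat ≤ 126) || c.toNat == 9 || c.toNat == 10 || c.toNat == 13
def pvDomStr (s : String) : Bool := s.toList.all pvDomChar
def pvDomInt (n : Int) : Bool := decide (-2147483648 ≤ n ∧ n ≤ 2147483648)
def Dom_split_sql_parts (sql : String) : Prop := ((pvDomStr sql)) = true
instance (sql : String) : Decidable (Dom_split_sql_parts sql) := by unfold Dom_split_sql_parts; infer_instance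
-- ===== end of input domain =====

-- B replaces A's sort-then-lookahead by a sort-free selection worklist (repeatedly pop the
-- keyword with the smallest position; its clause ends at the smallest position still in the
-- worklist, or at the end of the string); same return value.

-- the fixed keyword list both programs use
def pvKeywords : List String := ["SELECT", "FROM", "WHERE", "ORDER BY", "GROUP BY", "HAVING"]

-- ===== PORT A =====
def split_sql_parts (sql : String) : List (String × String) :=
  let sqlUpper := PySem.Str.upper sql
  let positions : PySem.Dict String Int :=
    pvKeywords.foldl (fun d keyword =>
      let pos := PySem.Str.find sqlUpper keyword
      if pos ≠ -1 then d.insert keyword pos else d) PySem.Dict.empty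
  let sortedPositions := PySem.List.sorted positions.items (fun x => x.2) false
  let parts : PySem.Dict String String :=
    (PySem.List.enumerate sortedPositions 0).foldl (fun d ip =>
      let start := ip.2.2 + PySem.Str.len ip.2.1
      let e := if ip.1 + 1 < (sortedPositions.length : Int)
               then (PySem.List.pyGetD sortedPositions (ip.1 + 1) ("", 0)).2
               else PySem.Str.len sql
      d.insert ip.2.1 (PySem.Str.strip (PySem.Str.slice sql (some start) (some e))))
      PySem.Dict.empty
  parts.items

-- ===== PORT B =====
-- termination helper for the worklist loop (cited in decreasing_by)
theorem pvRemoveShrinks {α : Type} [BEq α] [LawfulBEq α] {xs ys : List α} {v : α}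
    (h : PySem.List.remove? xs v = some ys) : ys.length < xs.length := by
  have hv : v ∈ xs := by
    by_contra hnot
    rw [(PySem.List.remove?_eq_none_iff xs v).2 hnot] at h
    simp at h
  rw [PySem.List.remove?_eq_some_erase xs v hv] at h
  cases h
  simpa [List.length_erase_of_mem hv] using Nat.sub_lt (List.length_pos_of_mem hv) Nat.one_pos

def pvSelectLoop (sql : String) (remaining : List (String × Int))
    (parts : PySem.Dict String String) : PySem.Dict String String :=
  match hm : PySem.List.min? remaining (fun kv => kv.2) with
  | none => parts
  | some kv =>
    match hr : PySem.List.remove? remaining kv with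
    | none => parts
    | some remaining' =>
      let e := PySem.List.minD (remaining'.map (fun q => q.2)) (fun p => p) (PySem.Str.len sql)
      pvSelectLoop sql remaining'
        (parts.insert kv.1 (PySem.Str.strip (PySem.Str.slice sql (some (kv.2 + PySem.Str.len kv.1)) (some e))))
  termination_by remaining.length
  decreasing_by exact pvRemoveShrinks hr

def split_sql_parts_alt (sql : String) : List (String × String) :=
  let sqlUpper := PySem.Str.upper sql
  let remaining : List (String × Int) :=
    pvKeywords.foldl (fun acc keyword =>
      let pos := PySem.Str.find sqlUpper keyword
      if pos ≠ -1 then acc ++ [(keyword, pos)] else acc) []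
  (pvSelectLoop sql remaining PySem.Dict.empty).items

-- ===== PRECONDITION & SPEC =====
def Spec_split_sql_parts (sql : String) (out : List (String × String)) : Prop := out = split_sql_parts_alt sql
instance (sql : String) (out : List (String × String)) : Decidable (Spec_split_sql_parts sql out) := by unfold Spec_split_sql_parts; infer_instance

-- ===== CLAIM (what is proved, stated in full; the proofs are below) =====
def Claim_equal_split_sql_parts : Prop := ∀ (sql : String), Dom_split_sql_parts sql → Spec_split_sql_parts sql (split_sql_parts sql)

-- ===== LEMMAS AND PROOFS =====

theorem pvMinAppend {α : Type} (key : α → Int) (R : List α) (x : α) :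
    PySem.List.min? (R ++ [x]) key =
      (match PySem.List.min? R key with
       | none => some x
       | some m => if key x < key m then some x else some m) := by
  simp [PySem.List.min?, List.foldl_append]
  rfl

theorem pvSortedAppend {α : Type} (key : α → Int) (R : List α) (x : α) :
    PySem.List.sorted (R ++ [x]) key false =
      PySem.List.insertBy (fun a b => decide (key a < key b)) x (PySem.List.sorted R key false) := by
  rw [PySem.List.sorted_eq_foldl_insertBy, PySem.List.sorted_eq_foldl_insertBy, List.foldl_append]
  rfl

theorem pvSortedCons {α : Type} [BEq α] [LawfulBEq α] (key : α → Int) :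
    ∀ (R : List α), R.Nodup → ∀ (m : α), PySem.List.min? R key = some m →
      PySem.List.sorted R key false = m :: PySem.List.sorted (R.erase m) key false := by
  intro R
  induction R using List.reverseRecOn with
  | nil => intro _ m hm; simp [PySem.List.min?] at hm
  | append_singleton R x ih =>
    intro hnd m hm
    rw [pvMinAppend] at hm
    cases hR : PySem.List.min? R key with
    | none =>
      have hRnil : R = [] := (PySem.List.min?_eq_none_iff _ _).1 hR
      subst hRnil
      rw [hR] at hm
      simp at hm
      subst hm
      simp [PySem.List.sorted, PySem.List.insertBy]
    | some m0 =>
      rw [hR] at hm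
      rw [List.nodup_append] at hnd
      obtain ⟨hndR, -, hdisj⟩ := hnd
      have hxR : x ∉ R := fun hx => hdisj x hx x (List.mem_singleton_self x) rfl
      have hrec := ih hndR m0 hR
      by_cases hlt : key x < key m0
      · simp [hlt] at hm
        subst hm
        rw [List.erase_append_right _ hxR]
        simp only [List.erase_cons_head, List.append_nil]
        rw [pvSortedAppend, hrec]
        simp [PySem.List.insertBy, hlt]
      · simp [hlt] at hm
        subst hm
        have hm0R : m0 ∈ R := PySem.List.min?_mem hR
        rw [List.erase_append_left _ hm0R]
        rw [pvSortedAppend, hrec, pvSortedAppend]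
        simp [PySem.List.insertBy, hlt]

theorem pvMinMap {α : Type} (f : α → Int) (xs : List α) :
    PySem.List.min? (xs.map f) (fun p => p) = (PySem.List.min? xs f).map f := by
  induction xs using List.reverseRecOn with
  | nil => simp [PySem.List.min?]
  | append_singleton R x ih =>
    rw [List.map_append, List.map_singleton, pvMinAppend, pvMinAppend, ih]
    cases hR : PySem.List.min? R f with
    | none => simp
    | some m0 =>
      by_cases h : f x < f m0 <;> simp [h]

def pvNext (sql : String) : List (String × Int) → Int
  | [] => PySem.Str.len sql
  | q :: _ => q.2

def pvG (sql : String) : List (String × Int) → PySem.Dict String String → PySem.Dict String String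
  | [], d => d
  | p :: rest, d =>
      pvG sql rest (d.insert p.1 (PySem.Str.strip (PySem.Str.slice sql (some (p.2 + PySem.Str.len p.1))
        (some (pvNext sql rest)))))

theorem pvG_cons (sql : String) (p : String × Int) (rest : List (String × Int))
    (d : PySem.Dict String String) :
    pvG sql (p :: rest) d =
      pvG sql rest (d.insert p.1 (PySem.Str.strip (PySem.Str.slice sql (some (p.2 + PySem.Str.len p.1))
        (some (pvNext sql rest))))) := rfl

theorem pvALoopAux (sql : String) (sp : List (String × Int)) :
    ∀ (n k : Nat) (d : PySem.Dict String String), sp.length - k = n →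
      (PySem.List.enumerate (sp.drop k) (k : Int)).foldl (fun d ip =>
        d.insert ip.2.1 (PySem.Str.strip (PySem.Str.slice sql (some (ip.2.2 + PySem.Str.len ip.2.1))
          (some (if ip.1 + 1 < (sp.length : Int)
                 then (PySem.List.pyGetD sp (ip.1 + 1) ("", 0)).2
                 else PySem.Str.len sql))))) d
      = pvG sql (sp.drop k) d := by
  intro n
  induction n with
  | zero =>
    intro k d hk
    have hnil : sp.drop k = [] := List.drop_eq_nil_iff.2 (by omega)
    rw [hnil]
    rfl
  | succ n ih =>
    intro k d hk
    have hklt : k < sp.length := by omega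
    rw [List.drop_eq_getElem_cons hklt, PySem.List.enumerate_cons, List.foldl_cons,
        show (k : Int) + 1 = ((k + 1 : Nat) : Int) from by push_cast; ring,
        ih (k + 1) _ (by omega)]
    rw [pvG_cons]
    have he : (if ((k + 1 : Nat) : Int) < (sp.length : Int)
                 then (PySem.List.pyGetD sp (((k + 1 : Nat) : Int)) ("", 0)).2
                 else PySem.Str.len sql) = pvNext sql (sp.drop (k + 1)) := by
      by_cases h : k + 1 < sp.length
      · rw [if_pos (by exact_mod_cast h), PySem.List.pyGetD_natCast, List.getD_eq_getElem sp ("", 0) h,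
          List.drop_eq_getElem_cons h]
        rfl
      · rw [if_neg (by push_cast; omega), List.drop_eq_nil_iff.2 (by omega)]
        rfl
    rw [he]

theorem pvSelectLoopEq (sql : String) :
    ∀ (n : Nat) (R : List (String × Int)), R.length ≤ n → R.Nodup →
      ∀ (d : PySem.Dict String String),
        pvSelectLoop sql R d = pvG sql (PySem.List.sorted R (fun x => x.2) false) d := by
  intro n
  induction n with
  | zero =>
    intro R hlen hnd d
    have : R = [] := List.length_eq_zero_iff.1 (Nat.le_zero.1 hlen)
    subst this
    rw [pvSelectLoop]
    rfl
  | succ n ih =>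
    intro R hlen hnd d
    cases hm : PySem.List.min? R (fun kv => kv.2) with
    | none =>
      have : R = [] := (PySem.List.min?_eq_none_iff _ _).1 hm
      subst this
      rw [pvSelectLoop]
      rfl
    | some kv =>
      have hkvR : kv ∈ R := PySem.List.min?_mem hm
      have hrem : PySem.List.remove? R kv = some (R.erase kv) :=
        PySem.List.remove?_eq_some_erase R kv hkvR
      rw [pvSelectLoop]
      rw [pvSortedCons (fun x => x.2) R hnd kv hm, pvG_cons]
      split
      · next heq => rw [heq] at hm; simp at hm
      · next kv' heq =>
        rw [hm] at heq
        cases heq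
        split
        · next heq2 => rw [heq2] at hrem; simp at hrem
        · next R' heq2 =>
          rw [hrem] at heq2
          cases heq2
          have hend : PySem.List.minD ((R.erase kv).map (fun q => q.2)) (fun p => p) (PySem.Str.len sql)
              = pvNext sql (PySem.List.sorted (R.erase kv) (fun x => x.2) false) := by
            rw [PySem.List.minD, pvMinMap (fun q : String × Int => q.2) (R.erase kv)]
            cases h2 : PySem.List.min? (R.erase kv) (fun x => x.2) with
            | none =>
              have : R.erase kv = [] := (PySem.List.min?_eq_none_iff _ _).1 h2
              rw [this]
              rfl
            | some m' =>
              rw [pvSortedCons (fun x => x.2) (R.erase kv) (hnd.erase kv) m' h2]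
              rfl
          have hlen' : (R.erase kv).length ≤ n := by
            have h1 : (R.erase kv).length < R.length :=
              Nat.lt_of_lt_of_le (by
                rw [List.length_erase_of_mem hkvR]
                exact Nat.sub_lt (List.length_pos_of_mem hkvR) Nat.one_pos) (Nat.le_refl _)
            omega
          rw [ih (R.erase kv) hlen' (hnd.erase kv) _]
          rw [hend]

theorem pvPositionsItems (su : String) :
    (pvKeywords.foldl (fun d keyword =>
        let pos := PySem.Str.find su keyword
        if pos ≠ -1 then d.insert keyword pos else d) (PySem.Dict.empty : PySem.Dict String Int)).items
    = pvKeywords.foldl (fun acc keyword =>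
        let pos := PySem.Str.find su keyword
        if pos ≠ -1 then acc ++ [(keyword, pos)] else acc) [] := by
  rw [PySem.List.foldl_ite_eq_foldl_filter (p := fun kw => PySem.Str.find su kw ≠ -1)
        (f := fun (d : PySem.Dict String Int) kw => d.insert kw (PySem.Str.find su kw))]
  rw [PySem.List.foldl_append_ite (p := fun kw => PySem.Str.find su kw ≠ -1)
        (f := fun kw => (kw, PySem.Str.find su kw))]
  rw [PySem.Dict.items_foldl_insert_fresh (k := fun kw => kw) (v := fun kw => PySem.Str.find su kw)]
  · simp [PySem.Dict.empty]
  · intro a _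
    exact PySem.Dict.contains_empty a
  · simp only [List.map_id']
    exact (by decide : pvKeywords.Nodup).filter _

theorem pvLNodup (su : String) :
    (pvKeywords.foldl (fun acc keyword =>
        let pos := PySem.Str.find su keyword
        if pos ≠ -1 then acc ++ [(keyword, pos)] else acc) ([] : List (String × Int))).Nodup := by
  rw [PySem.List.foldl_append_ite (p := fun kw => PySem.Str.find su kw ≠ -1)
        (f := fun kw => (kw, PySem.Str.find su kw))]
  simp only [List.nil_append]
  apply List.Nodup.map
  · intro a b h
    exact congrArg Prod.fst h
  · exact (by decide : pvKeywords.Nodup).filter _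

theorem pvALoop (sql : String) (sp : List (String × Int)) (d : PySem.Dict String String) :
    (PySem.List.enumerate sp 0).foldl (fun d ip =>
        let start := ip.2.2 + PySem.Str.len ip.2.1
        let e := if ip.1 + 1 < (sp.length : Int)
                 then (PySem.List.pyGetD sp (ip.1 + 1) ("", 0)).2
                 else PySem.Str.len sql
        d.insert ip.2.1 (PySem.Str.strip (PySem.Str.slice sql (some start) (some e)))) d
    = pvG sql sp d := by
  have h := pvALoopAux sql sp sp.length 0 d (by omega)
  simpa using h

theorem pvFinal (sql : String) : split_sql_parts sql = split_sql_parts_alt sql := by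
  simp only [split_sql_parts, split_sql_parts_alt]
  rw [pvPositionsItems (PySem.Str.upper sql)]
  rw [pvALoop]
  rw [pvSelectLoopEq sql
        (pvKeywords.foldl (fun acc keyword =>
          let pos := PySem.Str.find (PySem.Str.upper sql) keyword
          if pos ≠ -1 then acc ++ [(keyword, pos)] else acc) []).length
        _ (Nat.le_refl _) (pvLNodup (PySem.Str.upper sql))]

-- ===== VERDICT (by name: the statement is the Claim_ definition above) =====
theorem split_sql_parts_spec : Claim_equal_split_sql_parts := by
  intro sql _
  exact pvFinal sql
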